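-- pv_equiv track=rewrite | github.com/MoerAI/algorithm | goorm/calculator.py | solution
-- ===== SOURCE A (Python) =====
-- def solution(n, m):
--     sum = 0
--     for i in range(n, m + 1):
--         s = str(i)
--         l = list(s)
--         mul = 1
--         for c in l:
--             mul = mul * int(c)
--         sum += mul
--     return sum
-- ===== SOURCE B (Python) =====
-- def solution(n, m):
--     # digit product via recursive divmod instead of a string round-trip
--     def digprod(i):
--         return i if i < 10 else digprod(i // 10) * (i % 10)
--     return sum(map(digprod, range(n, m + 1)))
-- ===== Notes on version B (the rewrite author's own statement) =====
-- stated objective: alternative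
-- what changed: B computes each digit product arithmetically by recursive divmod instead of converting the integer to a string and multiplying int(c) over its characters, and sums via sum(map(...)).
import Mathlib
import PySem

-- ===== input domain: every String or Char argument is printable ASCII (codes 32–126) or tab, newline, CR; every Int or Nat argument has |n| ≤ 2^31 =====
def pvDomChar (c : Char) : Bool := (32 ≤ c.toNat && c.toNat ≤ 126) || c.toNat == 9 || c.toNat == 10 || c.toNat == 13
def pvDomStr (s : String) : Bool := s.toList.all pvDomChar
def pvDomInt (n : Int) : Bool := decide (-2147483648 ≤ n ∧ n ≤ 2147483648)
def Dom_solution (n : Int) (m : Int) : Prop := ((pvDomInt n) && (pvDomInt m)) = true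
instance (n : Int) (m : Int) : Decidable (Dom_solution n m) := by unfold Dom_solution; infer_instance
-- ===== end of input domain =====

-- B replaces A's string round-trip per integer (str(i), int(c) per char) by an arithmetic
-- recursive-divmod digit product (alternative algorithm for the per-integer step).

-- ===== PORT A =====
def solution (n : Int) (m : Int) : Int :=
  (PySem.List.pyRange n (m + 1) 1).foldl
    (fun sum i =>
      -- s = str(i); l = list(s); mul = prod of int(c) over l
      sum + (PySem.Int.toChars i).foldl
        (fun mul c => mul * (PySem.Int.ofChars? [c]).getD 0) 1)
    0

-- ===== PORT B =====
def pvDigprod (i : Int) : Int :=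
  if i < 10 then i
  else pvDigprod (PySem.Int.floordiv i 10) * PySem.Int.mod i 10
termination_by i.toNat
decreasing_by
  rw [PySem.Int.floordiv_eq_ediv_of_pos (by norm_num)]
  omega

def solution_alt (n : Int) (m : Int) : Int :=
  ((PySem.List.pyRange n (m + 1) 1).map pvDigprod).sum

-- ===== PRECONDITION & SPEC =====
-- A raises ValueError as soon as the loop reaches a negative i (int('-')); that happens
-- exactly when n < 0 and n ≤ m, so Pre_ requires 0 ≤ n or an empty range.
def Pre_solution (n : Int) (m : Int) : Prop := 0 ≤ n ∨ m < n
instance (n : Int) (m : Int) : Decidable (Pre_solution n m) := by unfold Pre_solution; infer_instance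
def pvWitness_solution : Int × Int := (0, 12)

def Spec_solution (n : Int) (m : Int) (out : Int) : Prop := out = solution_alt n m
instance (n : Int) (m : Int) (out : Int) : Decidable (Spec_solution n m out) := by unfold Spec_solution; infer_instance

-- ===== CLAIM (what is proved, stated in full; the proofs are below) =====
def Claim_equal_solution : Prop := ∀ (n : Int) (m : Int), Dom_solution n m → Pre_solution n m → Spec_solution n m (solution n m)

-- ===== LEMMAS AND PROOFS =====

-- int(c) of a decimal digit character is its value
theorem pv_digitVal (d : Nat) (hd : d < 10) :
    (PySem.Int.ofChars? [Nat.digitChar d]).getD 0 = (d : Int) := by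
  interval_cases d <;> decide

-- A's per-integer string fold equals B's arithmetic digit product, on naturals
theorem pv_strfold_eq (k : Nat) :
    (Nat.toDigits 10 k).foldl (fun mul c => mul * (PySem.Int.ofChars? [c]).getD 0) 1
      = pvDigprod (k : Int) := by
  induction k using Nat.strong_induction_on with
  | _ k ih =>
    by_cases hk : k < 10
    · rw [Nat.toDigits_of_lt_base hk, pvDigprod]
      rw [if_pos (by exact_mod_cast hk : (k : Int) < 10)]
      simp [pv_digitVal k hk]
    · rw [Nat.toDigits_of_base_le (by norm_num) (by omega), List.foldl_append]
      simp only [List.foldl_cons, List.foldl_nil]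
      rw [ih (k / 10) (by omega), pv_digitVal (k % 10) (by omega)]
      conv_rhs => rw [pvDigprod]
      rw [if_neg (by exact_mod_cast hk : ¬ (k : Int) < 10)]
      rw [PySem.Int.floordiv_eq_ediv_of_pos (by norm_num), PySem.Int.mod_eq_emod_of_pos (by norm_num)]
      norm_cast

theorem pv_strfold_eq_int (i : Int) (hi : 0 ≤ i) :
    (PySem.Int.toChars i).foldl (fun mul c => mul * (PySem.Int.ofChars? [c]).getD 0) 1
      = pvDigprod i := by
  have h1 : PySem.Int.toChars i = Nat.toDigits 10 i.toNat := by
    simp [PySem.Int.toChars, not_lt.mpr hi]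
  rw [h1, pv_strfold_eq, Int.toNat_of_nonneg hi]

theorem solution_spec : Claim_equal_solution := by
  intro n m _ hpre
  unfold Spec_solution solution solution_alt
  rw [PySem.List.foldl_add, zero_add]
  refine congrArg List.sum (List.map_congr_left ?_)
  intro i hi
  have hmem := PySem.List.mem_pyRange_one.mp hi
  have h0 : 0 ≤ i := by
    rcases hpre with h | h
    · omega
    · omega
  exact pv_strfold_eq_int i h0
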